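-- pv_equiv track=rewrite | github.com/kyjun719/algorithm | src/acmicpc/_5373/solution.py | turnplane
-- ===== SOURCE A (Python) =====
-- def turnplane(plane,cmd):
--     tmp = [['' for _ in range(3)] for _ in range(3)]
--     if cmd=='+':
--         for i in range(3):
--             for j in range(3):
--                 tmp[i][j] = plane[2-j][i]
--     else:
--         for i in range(3):
--             for j in range(3):
--                 tmp[i][j] = plane[j][2-i]
--     return tmp
-- ===== SOURCE B (Python) =====
-- RING = [(0, 0), (0, 1), (0, 2), (1, 2), (2, 2), (2, 1), (2, 0), (1, 0)]
--
-- def turnplane(plane, cmd):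
--     # ring-cycling: read the 8 border cells in clockwise order, cyclically
--     # shift them (by 2 clockwise, by 6 counterclockwise), keep the center.
--     vals = [plane[i][j] for i, j in RING]
--     k = 2 if cmd == '+' else 6
--     shifted = vals[-k:] + vals[:-k]
--     out = [['', '', ''], ['', '', ''], ['', '', '']]
--     out[1][1] = plane[1][1]
--     for (i, j), v in zip(RING, shifted):
--         out[i][j] = v
--     return out
-- ===== Notes on version B (the rewrite author's own statement) =====
-- stated objective: alternative
-- what changed: replaced the per-cell index-arithmetic double loop by the ring-cycling algorithm: read the 8 border cells in clockwise order, cyclically shift that ring (by 2 for clockwise, 6 for counterclockwise), keep the center fixed, and write the shifted ring back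
import Mathlib
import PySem

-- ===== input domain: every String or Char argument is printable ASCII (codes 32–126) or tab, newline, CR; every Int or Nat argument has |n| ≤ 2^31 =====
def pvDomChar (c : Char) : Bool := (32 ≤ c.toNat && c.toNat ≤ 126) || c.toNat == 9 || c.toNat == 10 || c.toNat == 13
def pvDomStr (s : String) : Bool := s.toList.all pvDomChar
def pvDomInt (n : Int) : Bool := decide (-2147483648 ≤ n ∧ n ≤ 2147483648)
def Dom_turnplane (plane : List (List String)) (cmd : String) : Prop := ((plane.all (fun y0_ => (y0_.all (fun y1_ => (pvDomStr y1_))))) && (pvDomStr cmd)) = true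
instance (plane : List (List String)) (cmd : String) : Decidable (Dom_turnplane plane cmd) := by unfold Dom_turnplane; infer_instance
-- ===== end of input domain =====

-- B rotates by cyclically shifting the 8 border cells along the ring (center fixed)
-- instead of A's per-cell index-arithmetic loops; equal wherever A returns.

-- ===== PORT A =====
-- plane[i] / row[j]; the getD default is only reached outside Pre_turnplane
-- (where the Python raises IndexError)
def pvRowA (plane : List (List String)) (i : Int) : List String :=
  (PySem.List.pyGet? plane i).getD []

def pvCellA (row : List String) (i : Int) : String :=
  (PySem.List.pyGet? row i).getD ""

-- tmp[i][j] = v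
def pvSet2 (tmp : List (List String)) (i j : Nat) (v : String) : List (List String) :=
  tmp.set i ((tmp.getD i []).set j v)

def turnplane (plane : List (List String)) (cmd : String) : List (List String) :=
  let tmp := List.replicate 3 (List.replicate 3 "")
  if cmd == "+" then
    (PySem.List.pyRange 0 3 1).foldl (fun t i =>
      (PySem.List.pyRange 0 3 1).foldl (fun t j =>
        pvSet2 t i.toNat j.toNat (pvCellA (pvRowA plane (2 - j)) i)) t) tmp
  else
    (PySem.List.pyRange 0 3 1).foldl (fun t i =>
      (PySem.List.pyRange 0 3 1).foldl (fun t j =>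
        pvSet2 t i.toNat j.toNat (pvCellA (pvRowA plane j) (2 - i))) t) tmp

-- ===== PORT B =====
-- the border ring in clockwise order (Python's RING constant)
def pvRing : List (Int × Int) :=
  [(0, 0), (0, 1), (0, 2), (1, 2), (2, 2), (2, 1), (2, 0), (1, 0)]

-- plane[i][j]; the getD default is only reached outside Pre_turnplane
def pvCellB (plane : List (List String)) (i j : Int) : String :=
  (PySem.List.pyGet? ((PySem.List.pyGet? plane i).getD []) j).getD ""

def turnplane_alt (plane : List (List String)) (cmd : String) : List (List String) :=
  let vals := pvRing.map (fun p => pvCellB plane p.1 p.2)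
  let k : Int := if cmd == "+" then 2 else 6
  -- vals[-k:] + vals[:-k]
  let shifted := PySem.List.slice vals (some (-k)) none ++ PySem.List.slice vals none (some (-k))
  let out0 : List (List String) := [["", "", ""], ["", "", ""], ["", "", ""]]
  let out1 := pvSet2 out0 1 1 (pvCellB plane 1 1)
  (pvRing.zip shifted).foldl (fun t p => pvSet2 t p.1.1.toNat p.1.2.toNat p.2) out1

-- ===== PRECONDITION & SPEC =====
-- Pre_ excludes exactly the inputs on which A raises IndexError: a plane with
-- fewer than 3 rows, or one of the first 3 rows shorter than 3.
def Pre_turnplane (plane : List (List String)) (cmd : String) : Prop :=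
  3 ≤ plane.length ∧ ∀ r ∈ plane.take 3, 3 ≤ r.length

instance (plane : List (List String)) (cmd : String) : Decidable (Pre_turnplane plane cmd) := by
  unfold Pre_turnplane; infer_instance

def pvWitness_turnplane : List (List String) × String :=
  ([["a", "b", "c"], ["d", "e", "f"], ["g", "h", "i"]], "+")

def Spec_turnplane (plane : List (List String)) (cmd : String) (out : List (List String)) : Prop :=
  out = turnplane_alt plane cmd
instance (plane : List (List String)) (cmd : String) (out : List (List String)) : Decidable (Spec_turnplane plane cmd out) := by unfold Spec_turnplane; infer_instance

-- ===== CLAIM =====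
def Claim_equal_turnplane : Prop := ∀ (plane : List (List String)) (cmd : String), Dom_turnplane plane cmd → Pre_turnplane plane cmd → Spec_turnplane plane cmd (turnplane plane cmd)

-- ===== LEMMAS AND PROOFS =====

-- a list of length ≥ 3 is three cons cells and a tail
lemma pv_three_cons {α : Type} (xs : List α) (h : 3 ≤ xs.length) :
    ∃ a b c t, xs = a :: b :: c :: t := by
  match xs with
  | a :: b :: c :: t => exact ⟨a, b, c, t, rfl⟩

-- ===== VERDICT =====
theorem turnplane_spec : Claim_equal_turnplane := by
  intro plane cmd _ hpre
  obtain ⟨hlen, hrows⟩ := hpre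
  obtain ⟨r0, r1, r2, rest, rfl⟩ := pv_three_cons plane hlen
  obtain ⟨a0, a1, a2, t0, rfl⟩ := pv_three_cons r0 (hrows _ (by simp))
  obtain ⟨b0, b1, b2, t1, rfl⟩ := pv_three_cons r1 (hrows _ (by simp))
  obtain ⟨c0, c1, c2, t2, rfl⟩ := pv_three_cons r2 (hrows _ (by simp))
  show Spec_turnplane _ _ _
  unfold Spec_turnplane turnplane turnplane_alt
  by_cases h : cmd == "+"
  · simp only [h, if_true]
    rfl
  · simp only [h, Bool.false_eq_true, if_false]
    rfl
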